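-- pv_equiv track=rewrite | github.com/CCNCAY/Enzyme-Finder | enzyme_finder.py | slice_tri
-- ===== SOURCE A (Python) =====
-- def slice_tri(seq):
--     trip_arr = []
--     while len(seq) % 3 > 0:
--         seq = seq + "N"
--     while len(seq) > 0:
--         trip_arr.append(seq[0:3])
--         seq = seq[3:]
--     return trip_arr
-- ===== SOURCE B (Python) =====
-- def slice_tri(seq):
--     result = []
--     buf = ""
--     for ch in seq:
--         buf += ch
--         if len(buf) == 3:
--             result.append(buf)
--             buf = ""
--     if buf:
--         while len(buf) < 3:
--             buf += "N"
--         result.append(buf)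
--     return result
-- ===== Notes on version B (the rewrite author's own statement) =====
-- stated objective: faster
-- what changed: Replaced A's pre-padding loop plus repeated slice-and-reassign chunking with a single pass over the characters maintaining a buffer that is flushed at length 3 and N-padded once at the end.
import Mathlib
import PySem

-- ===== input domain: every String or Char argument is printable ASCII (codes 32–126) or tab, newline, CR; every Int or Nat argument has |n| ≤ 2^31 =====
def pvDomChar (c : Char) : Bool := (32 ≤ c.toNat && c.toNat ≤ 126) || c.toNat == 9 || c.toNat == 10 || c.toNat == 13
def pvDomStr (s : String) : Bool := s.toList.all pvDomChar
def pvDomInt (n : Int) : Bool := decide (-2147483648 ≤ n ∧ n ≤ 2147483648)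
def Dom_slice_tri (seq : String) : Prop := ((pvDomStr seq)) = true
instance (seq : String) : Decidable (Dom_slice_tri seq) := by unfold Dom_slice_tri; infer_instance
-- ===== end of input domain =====

-- B replaces A's pad-then-repeatedly-slice loops with one pass over the characters
-- using a buffer flushed at length 3 and N-padded once at the end (objective: alternative).

-- helper cited by chunkA's decreasing_by: seq[3:] is strictly shorter when seq is nonempty
theorem pySliceFrom3_len_lt (l : List Char) (h : l.length > 0) :
    (PySem.List.slice l (some 3) none).length < l.length := by
  rw [PySem.List.slice_from l (by omega)]
  simp; omega

-- ===== PORT A =====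
-- while len(seq) % 3 > 0: seq = seq + "N"
def padLoopA (l : List Char) : List Char :=
  if l.length % 3 > 0 then padLoopA (l ++ ['N']) else l
termination_by (3 - l.length % 3) % 3
decreasing_by simp; omega

-- while len(seq) > 0: trip_arr.append(seq[0:3]); seq = seq[3:]
def chunkA (trip_arr : List String) (l : List Char) : List String :=
  if h : l.length > 0 then
    chunkA (trip_arr ++ [String.ofList (PySem.List.slice l (some 0) (some 3))])
      (PySem.List.slice l (some 3) none)
  else trip_arr
termination_by l.length
decreasing_by exact pySliceFrom3_len_lt l h

def slice_tri (seq : String) : List String := chunkA [] (padLoopA seq.toList)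

-- ===== PORT B =====
def stepB (st : List String × List Char) (c : Char) : List String × List Char :=
  let buf := st.2 ++ [c]
  if buf.length = 3 then (st.1 ++ [String.ofList buf], []) else (st.1, buf)

-- while len(buf) < 3: buf += "N"
def flushPadB (buf : List Char) : List Char :=
  if buf.length < 3 then flushPadB (buf ++ ['N']) else buf
termination_by 3 - buf.length
decreasing_by simp; omega

def finishB (st : List String × List Char) : List String :=
  if st.2.isEmpty then st.1 else st.1 ++ [String.ofList (flushPadB st.2)]

def slice_tri_alt (seq : String) : List String :=
  finishB (seq.toList.foldl stepB ([], []))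

-- ===== PRECONDITION & SPEC =====
def Spec_slice_tri (seq : String) (out : List String) : Prop := out = slice_tri_alt seq
instance (seq : String) (out : List String) : Decidable (Spec_slice_tri seq out) := by unfold Spec_slice_tri; infer_instance

-- ===== CLAIM (what is proved, stated in full; the proofs are below) =====
def Claim_equal_slice_tri : Prop := ∀ (seq : String), Dom_slice_tri seq → Spec_slice_tri seq (slice_tri seq)

-- ===== LEMMAS AND PROOFS =====

theorem padA_cons3 (a b c : Char) (r : List Char) :
    padLoopA (a :: b :: c :: r) = a :: b :: c :: padLoopA r := by
  by_cases h : r.length % 3 > 0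
  · have h' : (a :: b :: c :: r).length % 3 > 0 := by simp; omega
    conv_lhs => rw [padLoopA]
    conv_rhs => rw [padLoopA]
    rw [if_pos h', if_pos h]
    have e : (a :: b :: c :: r) ++ ['N'] = a :: b :: c :: (r ++ ['N']) := by simp
    rw [e, padA_cons3 a b c (r ++ ['N'])]
  · have h' : ¬ (a :: b :: c :: r).length % 3 > 0 := by simp; omega
    conv_lhs => rw [padLoopA]
    conv_rhs => rw [padLoopA]
    rw [if_neg h', if_neg h]
termination_by (3 - r.length % 3) % 3
decreasing_by simp; omega

theorem chunkA_acc (l : List Char) (acc : List String) :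
    chunkA acc l = acc ++ chunkA [] l := by
  by_cases h : l.length > 0
  · conv_lhs => rw [chunkA]
    conv_rhs => rw [chunkA]
    rw [dif_pos h, dif_pos h]
    simp only [List.nil_append]
    rw [chunkA_acc (PySem.List.slice l (some 3) none)
        ([String.ofList (PySem.List.slice l (some 0) (some 3))]),
      chunkA_acc (PySem.List.slice l (some 3) none)
        (acc ++ [String.ofList (PySem.List.slice l (some 0) (some 3))])]
    simp
  · conv_lhs => rw [chunkA]
    conv_rhs => rw [chunkA]
    rw [dif_neg h, dif_neg h]; simp
termination_by l.length
decreasing_by all_goals exact pySliceFrom3_len_lt l h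

theorem chunkA_nil : chunkA [] [] = [] := by
  rw [chunkA]; simp

theorem chunkA_cons3 (a b c : Char) (r : List Char) :
    chunkA [] (a :: b :: c :: r) = String.ofList [a, b, c] :: chunkA [] r := by
  conv_lhs => rw [chunkA]
  rw [dif_pos (by simp)]
  have e0 : PySem.List.slice (a :: b :: c :: r) (some 0) (some 3) = [a, b, c] := by
    rw [PySem.List.slice_toNat _ (by omega) (by omega)]; rfl
  have e3 : PySem.List.slice (a :: b :: c :: r) (some 3) none = r := by
    rw [PySem.List.slice_from _ (by omega)]; rfl
  rw [e0, e3]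
  simpa using chunkA_acc r [String.ofList [a, b, c]]

theorem foldB_acc (l : List Char) (acc : List String) (buf : List Char) :
    List.foldl stepB (acc, buf) l =
      (acc ++ (List.foldl stepB ([], buf) l).1, (List.foldl stepB ([], buf) l).2) := by
  induction l generalizing acc buf with
  | nil => simp
  | cons c t ih =>
    have hs : stepB (acc, buf) c =
        (acc ++ (stepB ([], buf) c).1, (stepB ([], buf) c).2) := by
      simp only [stepB]; split <;> simp
    simp only [List.foldl_cons, hs]
    rw [ih, ih ((stepB ([], buf) c).1)]
    simp

theorem finishB_append (acc : List String) (p : List String × List Char) :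
    finishB (acc ++ p.1, p.2) = acc ++ finishB p := by
  simp only [finishB]; split <;> simp

theorem foldB3 (a b c : Char) (r : List Char) :
    List.foldl stepB (([] : List String), ([] : List Char)) (a :: b :: c :: r) =
      List.foldl stepB ([String.ofList [a, b, c]], []) r := by
  simp [List.foldl, stepB]

theorem core_eq (l : List Char) :
    chunkA [] (padLoopA l) = finishB (List.foldl stepB ([], []) l) := by
  match l with
  | [] =>
    rw [padLoopA]; simp [chunkA_nil, finishB]
  | [a] =>
    have hp : padLoopA [a] = [a, 'N', 'N'] := by
      rw [padLoopA, if_pos (by simp), padLoopA, if_pos (by simp), padLoopA]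
      simp
    have hf : flushPadB [a] = [a, 'N', 'N'] := by
      rw [flushPadB, if_pos (by simp), flushPadB, if_pos (by simp), flushPadB]
      simp
    rw [hp, chunkA_cons3]
    simp [chunkA_nil, List.foldl, stepB, finishB, hf]
  | [a, b] =>
    have hp : padLoopA [a, b] = [a, b, 'N'] := by
      rw [padLoopA, if_pos (by simp), padLoopA]; simp
    have hf : flushPadB [a, b] = [a, b, 'N'] := by
      rw [flushPadB, if_pos (by simp), flushPadB]; simp
    rw [hp, chunkA_cons3]
    simp [chunkA_nil, List.foldl, stepB, finishB, hf]
  | a :: b :: c :: r =>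
    rw [padA_cons3, chunkA_cons3, foldB3, foldB_acc, finishB_append, core_eq r]
    simp
termination_by l.length

-- ===== VERDICT (by name: the statement is the Claim_ definition above) =====
theorem slice_tri_spec : Claim_equal_slice_tri := by
  intro seq _
  unfold Spec_slice_tri slice_tri slice_tri_alt
  exact core_eq seq.toList
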